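-- pv_equiv track=rewrite | github.com/griptoad26/x-knowledge-graph | distributions/x-knowledge-graph-vv0.5.1/core/pkm_exporter.py | _build_links_map
-- ===== SOURCE A (Python) =====
-- from typing import Dict, List, Any, Optional
--
-- def _build_links_map(edges: List[Dict], nodes: List[Dict]) -> Dict[str, List[str]]:
--     """Build a map of node_id -> list of linked node_ids"""
--     links_map = {}
--     node_ids = {n.get('id') for n in nodes}
--
--     for edge in edges:
--         source = edge.get('source', '')
--         target = edge.get('target', '')
--
--         if source in node_ids and target in node_ids:
--             if source not in links_map:
--                 links_map[source] = []
--             if target not in links_map[source]: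
--                 links_map[source].append(target)
--
--     return links_map
-- ===== SOURCE B (Python) =====
-- def _build_links_map(edges, nodes):
--     node_ids = {n.get('id') for n in nodes}
--     valid = [(s, t)
--              for s, t in ((e.get('source', ''), e.get('target', '')) for e in edges)
--              if s in node_ids and t in node_ids]
--     sources = list(dict.fromkeys(s for s, _ in valid))
--     return {s: list(dict.fromkeys(t for s2, t in valid if s2 == s)) for s in sources}
-- ===== Notes on version B (the rewrite author's own statement) =====
-- stated objective: alternative
-- what changed: A builds the adjacency dict incrementally in one loop, creating keys and deduplicating while appending; B keeps no dict during the edge traversal: it materialises the list of valid (source,target) pairs once, takes the distinct sources from it, and builds each adjacency list by a separate per-source scan over that pair list.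
import Mathlib
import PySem

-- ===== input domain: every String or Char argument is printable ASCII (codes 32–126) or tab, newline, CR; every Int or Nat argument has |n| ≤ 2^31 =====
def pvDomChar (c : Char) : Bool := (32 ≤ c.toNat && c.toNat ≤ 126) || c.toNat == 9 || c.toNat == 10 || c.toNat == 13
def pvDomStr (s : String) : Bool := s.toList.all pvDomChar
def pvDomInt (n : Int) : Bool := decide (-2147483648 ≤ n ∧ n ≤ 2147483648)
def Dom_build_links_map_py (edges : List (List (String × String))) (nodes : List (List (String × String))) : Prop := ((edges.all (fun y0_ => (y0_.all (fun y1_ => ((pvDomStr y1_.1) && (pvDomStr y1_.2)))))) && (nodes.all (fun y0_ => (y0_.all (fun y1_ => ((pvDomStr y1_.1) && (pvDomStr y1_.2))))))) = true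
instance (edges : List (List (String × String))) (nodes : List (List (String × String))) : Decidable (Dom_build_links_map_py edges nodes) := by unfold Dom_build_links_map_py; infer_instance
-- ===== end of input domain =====

-- B replaces A's incremental dict-with-dedup loop by a dict-free pipeline: collect the
-- valid (source, target) pairs once, then build each adjacency list by a per-source scan
-- over that pair list; same return value, no argument mutated.

-- ===== PORT A =====
-- one step of A's loop body (the state is the links_map dict)
def pvAStep (node_ids : PySem.Set (Option String)) (lm : PySem.Dict String (List String))
    (edge : List (String × String)) : PySem.Dict String (List String) :=
  let source := (PySem.Dict.mk edge).getD "source" ""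
  let target := (PySem.Dict.mk edge).getD "target" ""
  if PySem.Set.contains node_ids (some source) && PySem.Set.contains node_ids (some target) then
    let lm1 := if lm.contains source then lm else lm.insert source []
    let cur := lm1.getD source []
    if cur.contains target then lm1 else lm1.insert source (cur ++ [target])
  else lm

def build_links_map_py (edges : List (List (String × String))) (nodes : List (List (String × String))) : List (String × List String) :=
  let node_ids : PySem.Set (Option String) :=
    PySem.Set.ofList (nodes.map (fun n => (PySem.Dict.mk n).get? "id"))
  (edges.foldl (pvAStep node_ids) PySem.Dict.empty).items

-- ===== PORT B =====
def build_links_map_py_alt (edges : List (List (String × String))) (nodes : List (List (String × String))) : List (String × List String) :=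
  let node_ids : PySem.Set (Option String) :=
    PySem.Set.ofList (nodes.map (fun n => (PySem.Dict.mk n).get? "id"))
  -- valid = [(s, t) for s, t in ((e.get('source',''), e.get('target','')) for e in edges) if …]
  let valid : List (String × String) :=
    (edges.map (fun e => ((PySem.Dict.mk e).getD "source" "", (PySem.Dict.mk e).getD "target" ""))).filter
      (fun p => PySem.Set.contains node_ids (some p.1) && PySem.Set.contains node_ids (some p.2))
  -- sources = list(dict.fromkeys(s for s, _ in valid))
  let sources := PySem.List.dedup (valid.map Prod.fst)
  -- {s: list(dict.fromkeys(t for s2, t in valid if s2 == s)) for s in sources}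
  sources.map (fun s => (s, PySem.List.dedup ((valid.filter (fun p => p.1 == s)).map Prod.snd)))

-- ===== PRECONDITION & SPEC =====
def Spec_build_links_map_py (edges : List (List (String × String))) (nodes : List (List (String × String))) (out : List (String × List String)) : Prop := out = build_links_map_py_alt edges nodes
instance (edges : List (List (String × String))) (nodes : List (List (String × String))) (out : List (String × List String)) : Decidable (Spec_build_links_map_py edges nodes out) := by unfold Spec_build_links_map_py; infer_instance

-- ===== CLAIM (what is proved, stated in full; the proofs are below) =====
def Claim_equal_build_links_map_py : Prop := ∀ (edges : List (List (String × String))) (nodes : List (List (String × String))), Dom_build_links_map_py edges nodes → Spec_build_links_map_py edges nodes (build_links_map_py edges nodes)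

-- ===== LEMMAS AND PROOFS =====

-- A's loop body on an already-extracted valid pair
def pvUpd (lm : PySem.Dict String (List String)) (p : String × String) : PySem.Dict String (List String) :=
  let lm1 := if lm.contains p.1 then lm else lm.insert p.1 []
  let cur := lm1.getD p.1 []
  if cur.contains p.2 then lm1 else lm1.insert p.1 (cur ++ [p.2])

-- B's result as a function of the valid pair list
def pvF (vs : List (String × String)) : List (String × List String) :=
  (PySem.List.dedup (vs.map Prod.fst)).map
    (fun s => (s, PySem.List.dedup ((vs.filter (fun p => p.1 == s)).map Prod.snd)))

theorem pv_dedup_append {α : Type} [DecidableEq α] (xs : List α) (t : α) :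
    PySem.List.dedup (xs ++ [t]) = if t ∈ xs then PySem.List.dedup xs else PySem.List.dedup xs ++ [t] := by
  simp only [PySem.List.dedup_eq_ofList, PySem.Set.ofList_eq_foldl, List.foldl_append, List.foldl]
  by_cases h : t ∈ xs
  · simp [PySem.Set.add, PySem.Set.contains, h, ← PySem.Set.ofList_eq_foldl, PySem.Set.mem_ofList]
  · simp [PySem.Set.add, PySem.Set.contains, h, ← PySem.Set.ofList_eq_foldl, PySem.Set.mem_ofList]

theorem pv_ofList_append {α : Type} [DecidableEq α] (xs : List α) (t : α) :
    PySem.Set.ofList (xs ++ [t]) = if t ∈ xs then PySem.Set.ofList xs else PySem.Set.ofList xs ++ [t] := by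
  simpa [PySem.List.dedup_eq_ofList] using pv_dedup_append xs t

theorem pv_ofList_single {α : Type} [DecidableEq α] (t : α) : PySem.Set.ofList [t] = [t] := by
  simp [PySem.Set.ofList_eq_foldl, PySem.Set.add, PySem.Set.contains]

-- lookup in a dict whose items are keys.map g with (g k).1 = k
theorem pv_get_mk_map (keys : List String) (g : String → String × List String)
    (hg : ∀ k, (g k).1 = k) (k : String) :
    (PySem.Dict.mk (keys.map g)).get? k = if k ∈ keys then some (g k).2 else none := by
  induction keys with
  | nil => simp [PySem.Dict.get?]
  | cons a rest ih =>
    have hga : g a = (a, (g a).2) := by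
      have := hg a; cases hge : g a; simp_all
    rw [List.map_cons, hga, PySem.Dict.get?_mk_cons]
    by_cases h : a = k
    · subst h; simp
    · have hbk : (a == k) = false := by simp [h]
      rw [hbk]
      simp only [Bool.false_eq_true, if_false, ih]
      by_cases hk : k ∈ rest <;> simp [hk, Ne.symm h]

theorem pv_getF (qs : List (String × String)) (k : String) :
    (PySem.Dict.mk (pvF qs)).get? k =
      if k ∈ qs.map Prod.fst then some (PySem.List.dedup ((qs.filter (fun p => p.1 == k)).map Prod.snd)) else none := by
  unfold pvF
  rw [pv_get_mk_map _ _ (fun _ => rfl) k]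
  by_cases h : k ∈ qs.map Prod.fst <;> simp [PySem.Set.mem_ofList, h]

-- one step preserves the pvF characterisation
theorem pv_upd_step (qs : List (String × String)) (p : String × String) :
    (pvUpd (PySem.Dict.mk (pvF qs)) p).items = pvF (qs ++ [p]) := by
  obtain ⟨s, t⟩ := p
  have hget := pv_getF qs s
  have hcont : (PySem.Dict.mk (pvF qs)).contains s = decide (s ∈ qs.map Prod.fst) := by
    rw [PySem.Dict.contains_eq_isSome_get?, hget]
    by_cases h : s ∈ qs.map Prod.fst <;> simp [h]
  have hfilter_ne : ∀ k, k ≠ s →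
      (qs ++ [(s, t)]).filter (fun p => p.1 == k) = qs.filter (fun p => p.1 == k) := by
    intro k hk
    rw [List.filter_append]
    have : (s == k) = false := by simp [Ne.symm hk]
    simp [this]
  have hfilter_s : (qs ++ [(s, t)]).filter (fun p => p.1 == s)
      = qs.filter (fun p => p.1 == s) ++ [(s, t)] := by
    rw [List.filter_append]; simp
  have hRkeys : PySem.List.dedup ((qs ++ [(s, t)]).map Prod.fst)
      = if s ∈ qs.map Prod.fst then PySem.List.dedup (qs.map Prod.fst)
        else PySem.List.dedup (qs.map Prod.fst) ++ [s] := by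
    rw [List.map_append]; exact pv_dedup_append _ s
  set tgts := (qs.filter (fun p => p.1 == s)).map Prod.snd with htgts
  by_cases hs : s ∈ qs.map Prod.fst
  · have hc : (PySem.Dict.mk (pvF qs)).contains s = true := by rw [hcont]; simp [hs]
    have hgd : (PySem.Dict.mk (pvF qs)).getD s [] = PySem.List.dedup tgts := by
      rw [PySem.Dict.getD_eq_get?_getD, hget]; simp [hs]
    unfold pvUpd
    simp only [hc, if_true, hgd]
    by_cases hmem : t ∈ tgts
    · have hct : (PySem.List.dedup tgts).contains t = true := by
        simp [hmem]
      simp only [hct, if_true]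
      -- result unchanged; pvF also unchanged
      unfold pvF
      rw [hRkeys]; simp only [hs, if_true]
      apply List.map_congr_left
      intro k _
      by_cases hk : k = s
      · subst hk
        rw [hfilter_s, List.map_append, ← htgts]
        simp [pv_ofList_append, hmem]
      · rw [hfilter_ne k hk]
    · have hct : (PySem.List.dedup tgts).contains t = false := by
        simp [hmem]
      simp only [hct, Bool.false_eq_true, if_false]
      rw [PySem.Dict.items_insert_of_contains _ _ hc]
      -- items of mk l are l
      show (pvF qs).map (fun q => if q.1 == s then (s, PySem.List.dedup tgts ++ [t]) else q) = _
      unfold pvF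
      rw [hRkeys]; simp only [hs, if_true, List.map_map]
      apply List.map_congr_left
      intro k _
      by_cases hk : k = s
      · subst hk
        simp only [Function.comp, beq_self_eq_true, if_true]
        rw [hfilter_s, List.map_append, ← htgts]
        simp [pv_ofList_append, hmem]
      · have hbk : (k == s) = false := by simp [hk]
        simp only [Function.comp, hbk, Bool.false_eq_true, if_false]
        rw [hfilter_ne k hk]
  · have hc : (PySem.Dict.mk (pvF qs)).contains s = false := by rw [hcont]; simp [hs]
    have hempty : qs.filter (fun p => p.1 == s) = [] := by
      rw [List.filter_eq_nil_iff]
      intro p hp hbs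
      exact hs (List.mem_map.mpr ⟨p, hp, eq_of_beq hbs⟩)
    unfold pvUpd
    simp only [hc, Bool.false_eq_true, if_false]
    rw [PySem.Dict.getD_insert_self]
    simp only [List.contains_nil, Bool.false_eq_true, if_false, List.nil_append,
      PySem.Dict.insert_insert_self]
    rw [PySem.Dict.items_insert_of_not_contains _ _ hc]
    show pvF qs ++ [(s, [t])] = _
    unfold pvF
    rw [hRkeys]; simp only [hs, if_false, List.map_append]
    congr 1
    · apply List.map_congr_left
      intro k hk
      have hk' : k ≠ s := by
        rintro rfl; exact hs (by simpa [PySem.List.mem_dedup] using hk)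
      rw [hfilter_ne k hk']
    · rw [List.map_cons, List.map_nil, hfilter_s, hempty]
      simp [pv_ofList_single]

theorem pv_loop (ps qs : List (String × String)) :
    (ps.foldl pvUpd (PySem.Dict.mk (pvF qs))).items = pvF (qs ++ ps) := by
  induction ps generalizing qs with
  | nil => simp
  | cons p rest ih =>
    have hstep : pvUpd (PySem.Dict.mk (pvF qs)) p = PySem.Dict.mk (pvF (qs ++ [p])) := by
      have h := pv_upd_step qs p
      cases hd : pvUpd (PySem.Dict.mk (pvF qs)) p with
      | mk l => rw [hd] at h; simp at h; rw [h]
    rw [List.foldl_cons, hstep, ih]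
    simp

-- A's fold over edges = fold of pvUpd over the valid pair list
theorem pv_A_as_pairs (nids : PySem.Set (Option String)) (edges : List (List (String × String)))
    (d : PySem.Dict String (List String)) :
    edges.foldl (pvAStep nids) d =
      (((edges.map (fun e => ((PySem.Dict.mk e).getD "source" "", (PySem.Dict.mk e).getD "target" ""))).filter
        (fun p => PySem.Set.contains nids (some p.1) && PySem.Set.contains nids (some p.2))).foldl pvUpd d) := by
  have hfun : pvAStep nids = fun (acc : PySem.Dict String (List String)) (e : List (String × String)) =>
      if PySem.Set.contains nids (some ((PySem.Dict.mk e).getD "source" "")) &&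
         PySem.Set.contains nids (some ((PySem.Dict.mk e).getD "target" "")) then
        pvUpd acc ((PySem.Dict.mk e).getD "source" "", (PySem.Dict.mk e).getD "target" "") else acc := by
    funext acc e
    rfl
  conv_rhs => rw [← PySem.List.foldl_if_eq_foldl_filter, List.foldl_map]
  rw [hfun]

-- ===== VERDICT (by name: the statement is the Claim_ definition above) =====
theorem build_links_map_py_spec : Claim_equal_build_links_map_py := by
  intro edges nodes _
  unfold Spec_build_links_map_py
  show (edges.foldl (pvAStep (PySem.Set.ofList (nodes.map (fun n => (PySem.Dict.mk n).get? "id")))) PySem.Dict.empty).items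
      = pvF ((edges.map (fun e => ((PySem.Dict.mk e).getD "source" "", (PySem.Dict.mk e).getD "target" ""))).filter
          (fun p => PySem.Set.contains (PySem.Set.ofList (nodes.map (fun n => (PySem.Dict.mk n).get? "id"))) (some p.1) &&
                    PySem.Set.contains (PySem.Set.ofList (nodes.map (fun n => (PySem.Dict.mk n).get? "id"))) (some p.2)))
  rw [pv_A_as_pairs]
  have hempty : (PySem.Dict.empty : PySem.Dict String (List String)) = PySem.Dict.mk (pvF []) := rfl
  rw [hempty, pv_loop, List.nil_append]
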